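-- pv_equiv track=rewrite | github.com/marcwie/advent-of-code-2024 | day05.py | rules_dictionary
-- ===== SOURCE A (Python) =====
-- def rules_dictionary(rules):
--
--     rules_dic = {}
--
--     for page, allowed_follows in rules:
--
--         if page not in rules_dic.keys():
--             rules_dic[page] = set()
--         if allowed_follows not in rules_dic.keys():
--             rules_dic[allowed_follows] = set()
--
--         rules_dic[page].add(allowed_follows)
--
--     return rules_dic
-- ===== SOURCE B (Python) =====
-- def rules_dictionary(rules):
--     # Group-by comprehension: list the distinct nodes, then for each node filter
--     # the whole rules list for its successors (nested scans, no incremental dict).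
--     seen = []
--     for pair in rules:
--         for x in pair:
--             if x not in seen:
--                 seen.append(x)
--     return {k: {b for a, b in rules if a == k} for k in seen}
-- ===== Notes on version B (the rewrite author's own statement) =====
-- stated objective: alternative
-- what changed: A builds the dict incrementally in one pass, guarding key creation and mutating per-key sets as pairs arrive; B never builds a dict incrementally: it lists the distinct nodes, then computes each node's successor set by filtering the entire rules list per key (a group-by of nested scans).
import Mathlib
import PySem

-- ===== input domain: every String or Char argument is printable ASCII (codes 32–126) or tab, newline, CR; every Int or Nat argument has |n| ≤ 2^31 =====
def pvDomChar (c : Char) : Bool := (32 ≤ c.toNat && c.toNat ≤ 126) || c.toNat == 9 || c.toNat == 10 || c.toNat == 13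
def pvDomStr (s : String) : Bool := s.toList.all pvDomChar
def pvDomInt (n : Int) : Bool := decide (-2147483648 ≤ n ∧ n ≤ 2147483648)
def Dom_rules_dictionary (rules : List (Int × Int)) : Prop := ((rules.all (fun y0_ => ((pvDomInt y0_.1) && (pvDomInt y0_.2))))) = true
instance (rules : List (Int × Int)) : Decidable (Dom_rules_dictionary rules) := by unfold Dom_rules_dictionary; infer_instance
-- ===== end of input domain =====

-- B replaces A's incremental guarded dict pass by a group-by: list the distinct nodes, then filter the whole rules list per key (alternative decomposition, nested scans).


-- ===== PORT A =====
def rules_dictionary (rules : List (Int × Int)) : List (Int × List Int) :=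
  (rules.foldl (fun d pr =>
      let d1 := if d.contains pr.1 then d else d.insert pr.1 PySem.Set.empty
      let d2 := if d1.contains pr.2 then d1 else d1.insert pr.2 PySem.Set.empty
      d2.modify pr.1 [] (fun s => PySem.Set.add s pr.2))
    PySem.Dict.empty).items

-- ===== PORT B =====
def rules_dictionary_alt (rules : List (Int × Int)) : List (Int × List Int) :=
  let seen := rules.foldl (fun s pr => PySem.Set.add (PySem.Set.add s pr.1) pr.2) PySem.Set.empty
  seen.map (fun k => (k, PySem.Set.ofList ((rules.filter (fun pr => pr.1 == k)).map Prod.snd)))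

-- ===== PRECONDITION & SPEC =====
def Spec_rules_dictionary (rules : List (Int × Int)) (out : List (Int × List Int)) : Prop := out = rules_dictionary_alt rules
instance (rules : List (Int × Int)) (out : List (Int × List Int)) : Decidable (Spec_rules_dictionary rules out) := by unfold Spec_rules_dictionary; infer_instance

-- ===== CLAIM (what is proved, stated in full; the proofs are below) =====
def Claim_equal_rules_dictionary : Prop := ∀ (rules : List (Int × Int)), Dom_rules_dictionary rules → Spec_rules_dictionary rules (rules_dictionary rules)

-- ===== LEMMAS AND PROOFS =====

-- A's loop step.
def pvStepA (d : PySem.Dict Int (List Int)) (pr : Int × Int) : PySem.Dict Int (List Int) :=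
  let d1 := if d.contains pr.1 then d else d.insert pr.1 PySem.Set.empty
  let d2 := if d1.contains pr.2 then d1 else d1.insert pr.2 PySem.Set.empty
  d2.modify pr.1 [] (fun s => PySem.Set.add s pr.2)

-- a fresh-key insert with the empty set does not change getD-with-default-[]
lemma getD_guard_insert (d : PySem.Dict Int (List Int)) (k c : Int) :
    (if d.contains k then d else d.insert k PySem.Set.empty).getD c [] = d.getD c [] := by
  split
  · rfl
  · rename_i h
    rw [PySem.Dict.getD_insert]
    split
    · rename_i hc; subst hc
      exact (PySem.Dict.getD_of_not_contains d [] (by simpa using h)).symm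
    · rfl

lemma getD_stepA (d : PySem.Dict Int (List Int)) (pr : Int × Int) (c : Int) :
    (pvStepA d pr).getD c [] =
      if c = pr.1 then PySem.Set.add (d.getD c []) pr.2 else d.getD c [] := by
  unfold pvStepA
  rw [PySem.Dict.getD_modify]
  simp only [getD_guard_insert]
  split <;> rename_i h
  · rw [h]
  · rfl

lemma getD_foldA (rules : List (Int × Int)) (d : PySem.Dict Int (List Int)) (c : Int) :
    (rules.foldl pvStepA d).getD c [] =
      rules.foldl (fun s pr => if c = pr.1 then PySem.Set.add s pr.2 else s) (d.getD c []) := by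
  induction rules generalizing d with
  | nil => rfl
  | cons pr t ih => simp only [List.foldl_cons, ih, getD_stepA]

-- per-key fold with a guard IS the fold over the filtered successors
lemma foldl_if_eq_filter (rules : List (Int × Int)) (c : Int) (s0 : List Int) :
    rules.foldl (fun s pr => if c = pr.1 then PySem.Set.add s pr.2 else s) s0 =
      ((rules.filter (fun pr => pr.1 == c)).map Prod.snd).foldl PySem.Set.add s0 := by
  induction rules generalizing s0 with
  | nil => rfl
  | cons pr t ih =>
      simp only [List.foldl_cons, List.filter_cons]
      by_cases h : pr.1 = c
      · rw [if_pos h.symm, if_pos (by simpa using h)]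
        simp [ih]
      · rw [if_neg (fun hc => h hc.symm), if_neg (by simpa using h)]
        exact ih s0

-- keys side
lemma keys_guard_insert (d : PySem.Dict Int (List Int)) (k : Int) :
    (if d.contains k then d else d.insert k PySem.Set.empty).keys = PySem.Set.add d.keys k := by
  by_cases h : d.contains k
  · rw [if_pos h, PySem.Set.add, if_pos]
    simpa [PySem.Set.contains, List.contains_iff_mem] using (PySem.Dict.contains_iff_mem_keys d k).mp h
  · rw [if_neg h, PySem.Dict.keys_insert_of_not_contains d _ (by simpa using h), PySem.Set.add, if_neg]
    simp only [PySem.Set.contains, List.contains_iff_mem]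
    intro hm
    exact h ((PySem.Dict.contains_iff_mem_keys d k).mpr hm)

lemma keys_insert_add (d : PySem.Dict Int (List Int)) (k : Int) (v : List Int) :
    (d.insert k v).keys = PySem.Set.add d.keys k := by
  by_cases h : d.contains k
  · rw [PySem.Dict.keys_insert_of_contains d v h, PySem.Set.add, if_pos]
    simpa [PySem.Set.contains, List.contains_iff_mem] using (PySem.Dict.contains_iff_mem_keys d k).mp h
  · rw [PySem.Dict.keys_insert_of_not_contains d _ (by simpa using h), PySem.Set.add, if_neg]
    simp only [PySem.Set.contains, List.contains_iff_mem]
    intro hm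
    exact h ((PySem.Dict.contains_iff_mem_keys d k).mpr hm)

lemma keys_stepA (d : PySem.Dict Int (List Int)) (pr : Int × Int) :
    (pvStepA d pr).keys = PySem.Set.add (PySem.Set.add d.keys pr.1) pr.2 := by
  unfold pvStepA
  rw [PySem.Dict.keys_modify, keys_insert_add, keys_guard_insert, keys_guard_insert]
  rw [PySem.Set.add, if_pos]
  have h1 : pr.1 ∈ PySem.Set.add d.keys pr.1 := by
    rw [PySem.Set.add]; split
    · rename_i hc; simpa [PySem.Set.contains, List.contains_iff_mem] using hc
    · exact List.mem_append_right _ (List.mem_singleton.mpr rfl)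
  have h2 : pr.1 ∈ PySem.Set.add (PySem.Set.add d.keys pr.1) pr.2 := by
    rw [PySem.Set.add]; split
    · exact h1
    · exact List.mem_append_left _ h1
  simp only [PySem.Set.contains, List.contains_iff_mem]
  exact h2

-- A's keys are exactly B's `seen` fold
lemma keys_foldA (rules : List (Int × Int)) (d : PySem.Dict Int (List Int)) :
    (rules.foldl pvStepA d).keys =
      rules.foldl (fun s pr => PySem.Set.add (PySem.Set.add s pr.1) pr.2) d.keys := by
  induction rules generalizing d with
  | nil => rfl
  | cons pr t ih => simp only [List.foldl_cons, ih, keys_stepA]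

lemma seen_nodup (rules : List (Int × Int)) (s : List Int) (hs : s.Nodup) :
    (rules.foldl (fun s pr => PySem.Set.add (PySem.Set.add s pr.1) pr.2) s).Nodup := by
  induction rules generalizing s with
  | nil => exact hs
  | cons pr t ih =>
      exact ih _ (PySem.Set.nodup_add _ _ (PySem.Set.nodup_add _ _ hs))

-- items reconstruction from keys and getD, for nodup-key dicts
lemma items_eq_keys_map (l : List (Int × List Int)) (h : (l.map Prod.fst).Nodup) :
    l = (l.map Prod.fst).map (fun k => (k, (PySem.Dict.mk l).getD k [])) := by
  induction l with
  | nil => rfl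
  | cons p t ih =>
      obtain ⟨a, v⟩ := p
      obtain ⟨hni, hnd⟩ := List.nodup_cons.mp h
      simp only [List.map_cons]
      congr 1
      · rw [PySem.Dict.getD, PySem.Dict.get?_mk_cons]
        simp
      · conv_lhs => rw [ih hnd]
        apply List.map_congr_left
        intro k hk
        have hne : ¬ (a == k) = true := by
          simp only [beq_iff_eq]
          rintro rfl; exact hni hk
        simp [PySem.Dict.getD, PySem.Dict.get?_mk_cons, hne]

lemma dict_items_eq (d : PySem.Dict Int (List Int)) (h : d.keys.Nodup) :
    d.items = d.keys.map (fun k => (k, d.getD k [])) := by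
  obtain ⟨l⟩ := d
  exact items_eq_keys_map l h

-- ===== VERDICT (by name: the statement is the Claim_ definition above) =====
theorem rules_dictionary_spec : Claim_equal_rules_dictionary := by
  intro rules _
  unfold Spec_rules_dictionary rules_dictionary rules_dictionary_alt
  set dA := rules.foldl pvStepA PySem.Dict.empty with hdA
  have hA_def : rules.foldl (fun d pr =>
      let d1 := if d.contains pr.1 then d else d.insert pr.1 PySem.Set.empty
      let d2 := if d1.contains pr.2 then d1 else d1.insert pr.2 PySem.Set.empty
      d2.modify pr.1 [] (fun s => PySem.Set.add s pr.2)) PySem.Dict.empty = dA := rfl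
  rw [hA_def]
  set seen := rules.foldl (fun s pr => PySem.Set.add (PySem.Set.add s pr.1) pr.2) PySem.Set.empty with hseen
  have hkA : dA.keys = seen := by
    rw [hdA, keys_foldA]; rfl
  have hnd : seen.Nodup := seen_nodup rules [] (by simp)
  rw [dict_items_eq dA (hkA ▸ hnd), hkA]
  apply List.map_congr_left
  intro k _
  have : dA.getD k [] =
      PySem.Set.ofList ((rules.filter (fun pr => pr.1 == k)).map Prod.snd) := by
    rw [hdA, getD_foldA]
    have h0 : (PySem.Dict.empty : PySem.Dict Int (List Int)).getD k [] = [] := rfl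
    rw [h0, foldl_if_eq_filter]
    rfl
  simp [this]
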